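-- pv_equiv track=rewrite | github.com/entrepidea/projects | python/algo/leetcode/levels/easy/min_cost_moving_coins.py | mov_coin
-- ===== SOURCE A (Python) =====
-- from typing import List
--
-- def mov_coin(pos : List[int]) ->int:
-- 	ret = []
-- 	for i in range(len(pos)):
-- 		s = 0
-- 		#all left to i
-- 		for j in range(i):
-- 			l = abs(pos[j]-pos[i])
-- 			if l%2 == 1:
-- 				s += 1
-- 		#all right to i
-- 		for j in range(i+1,len(pos)):
-- 			l = abs(pos[j]-pos[i])
-- 			if l%2 == 1:
-- 				s += 1
-- 		ret.append(s)
--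
-- 	return min(ret)
-- ===== SOURCE B (Python) =====
-- def mov_coin(pos):
--     odd = 0
--     for p in pos:
--         if p % 2:
--             odd += 1
--     even = len(pos) - odd
--     if even and odd:
--         return min(even, odd)
--     return 0
-- ===== Notes on version B (the rewrite author's own statement) =====
-- stated objective: faster
-- what changed: replaced the per-position nested scans with one pass counting even and odd positions (an opposite-parity move costs 1, a same-parity move 0, so each position's cost is the count of the other parity) and returns the minimum of the two counts when both parities occur
import Mathlib
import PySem

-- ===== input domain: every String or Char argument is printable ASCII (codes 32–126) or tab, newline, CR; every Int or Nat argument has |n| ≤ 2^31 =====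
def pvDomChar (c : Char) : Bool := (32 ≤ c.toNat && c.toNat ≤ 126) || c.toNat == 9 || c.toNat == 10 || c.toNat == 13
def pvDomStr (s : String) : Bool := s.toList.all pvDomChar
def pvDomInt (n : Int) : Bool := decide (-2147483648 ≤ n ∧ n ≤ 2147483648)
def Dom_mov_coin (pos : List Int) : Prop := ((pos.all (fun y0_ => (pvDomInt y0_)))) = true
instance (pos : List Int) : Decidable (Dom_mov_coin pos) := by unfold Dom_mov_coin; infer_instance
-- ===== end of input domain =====

-- B replaces A's per-position nested scans by a single pass counting even and odd positions and taking the minimum of the two counts where both parities occur.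


-- ===== PORT A =====
def mov_coin (pos : List Int) : Int :=
  let n : Int := PySem.List.len pos
  let ret : List Int :=
    (PySem.List.pyRange 0 n 1).foldl (fun ret i =>
      let s1 : Int :=
        (PySem.List.pyRange 0 i 1).foldl (fun s j =>
          let l : Int := |PySem.List.pyGetD pos j 0 - PySem.List.pyGetD pos i 0|
          if PySem.Int.mod l 2 = 1 then s + 1 else s) 0
      let s2 : Int :=
        (PySem.List.pyRange (i + 1) n 1).foldl (fun s j =>
          let l : Int := |PySem.List.pyGetD pos j 0 - PySem.List.pyGetD pos i 0|
          if PySem.Int.mod l 2 = 1 then s + 1 else s) s1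
      ret ++ [s2]) []
  (PySem.List.min? ret (fun x => x)).getD 0

-- ===== PORT B =====
def mov_coin_alt (pos : List Int) : Int :=
  let odd : Int := pos.foldl (fun acc p => if PySem.Int.mod p 2 ≠ 0 then acc + 1 else acc) 0
  let even : Int := PySem.List.len pos - odd
  if even ≠ 0 ∧ odd ≠ 0 then min even odd else 0

-- ===== PRECONDITION & SPEC =====
-- Pre_ excludes exactly the empty list, on which A raises ValueError (min() of an empty sequence).
def Pre_mov_coin (pos : List Int) : Prop := pos ≠ []
instance (pos : List Int) : Decidable (Pre_mov_coin pos) := by unfold Pre_mov_coin; infer_instance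
def pvWitness_mov_coin : List Int := [0, 3]

def Spec_mov_coin (pos : List Int) (out : Int) : Prop := out = mov_coin_alt pos
instance (pos : List Int) (out : Int) : Decidable (Spec_mov_coin pos out) := by unfold Spec_mov_coin; infer_instance

-- ===== CLAIM (what is proved, stated in full; the proofs are below) =====
def Claim_equal_mov_coin : Prop := ∀ (pos : List Int), Dom_mov_coin pos → Pre_mov_coin pos → Spec_mov_coin pos (mov_coin pos)

-- ===== LEMMAS AND PROOFS =====

-- number of odd / even elements of pos (under Python's % 2)
def pvOddC (pos : List Int) : Nat := pos.countP (fun p => decide (PySem.Int.mod p 2 ≠ 0))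
def pvEvenC (pos : List Int) : Nat := pos.countP (fun p => decide (PySem.Int.mod p 2 = 0))

-- the cost A computes at a position of parity p: the count of the opposite parity
def pvF (pos : List Int) (p : Int) : Int :=
  if PySem.Int.mod p 2 = 0 then (pvOddC pos : Int) else (pvEvenC pos : Int)

theorem pv_parity_abs (a c : Int) : (PySem.Int.mod |a - c| 2 = 1) ↔ PySem.Int.mod a 2 ≠ PySem.Int.mod c 2 := by
  rw [PySem.Int.mod_eq_emod_of_pos (by norm_num), PySem.Int.mod_eq_emod_of_pos (by norm_num),
      PySem.Int.mod_eq_emod_of_pos (by norm_num)]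
  rcases abs_cases (a - c) with ⟨h1, h2⟩ | ⟨h1, h2⟩ <;> rw [h1] <;> omega

theorem pv_count_diff (pos : List Int) (c : Int) :
    pos.countP (fun q => decide (PySem.Int.mod |q - c| 2 = 1)) =
      if PySem.Int.mod c 2 = 0 then pvOddC pos else pvEvenC pos := by
  have hc0 := PySem.Int.mod_nonneg c (b := 2) (by norm_num)
  have hc1 := PySem.Int.mod_lt c (b := 2) (by norm_num)
  split_ifs with hc
  · unfold pvOddC
    refine List.countP_congr ?_
    intro q _
    have := pv_parity_abs q c
    simp only [decide_eq_true_eq]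
    omega
  · unfold pvEvenC
    refine List.countP_congr ?_
    intro q _
    have := pv_parity_abs q c
    have hq0 := PySem.Int.mod_nonneg q (b := 2) (by norm_num)
    have hq1 := PySem.Int.mod_lt q (b := 2) (by norm_num)
    simp only [decide_eq_true_eq]
    omega

-- A's ret list is pos mapped through pvF
theorem pv_ret_eq (pos : List Int) :
    (PySem.List.pyRange 0 (PySem.List.len pos) 1).foldl (fun ret i =>
      let s1 : Int :=
        (PySem.List.pyRange 0 i 1).foldl (fun s j =>
          let l : Int := |PySem.List.pyGetD pos j 0 - PySem.List.pyGetD pos i 0|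
          if PySem.Int.mod l 2 = 1 then s + 1 else s) 0
      let s2 : Int :=
        (PySem.List.pyRange (i + 1) (PySem.List.len pos) 1).foldl (fun s j =>
          let l : Int := |PySem.List.pyGetD pos j 0 - PySem.List.pyGetD pos i 0|
          if PySem.Int.mod l 2 = 1 then s + 1 else s) s1
      ret ++ [s2]) [] =
    pos.map (pvF pos) := by
  rw [PySem.List.foldl_append_singleton_eq_map, List.nil_append]
  set g := pvF pos with hg
  conv_rhs => rw [← PySem.List.map_pyGetD_pyRange_zero pos 0, List.map_map]
  refine List.map_congr_left ?_
  intro i hi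
  rw [PySem.List.mem_pyRange_one] at hi
  simp only [Function.comp]
  rw [PySem.List.foldl_ite_add_one, PySem.List.foldl_ite_add_one]
  set c := PySem.List.pyGetD pos i 0 with hc
  have key : pos.countP (fun q => decide (PySem.Int.mod |q - c| 2 = 1)) =
      (PySem.List.pyRange 0 i 1).countP (fun j => decide (PySem.Int.mod |PySem.List.pyGetD pos j 0 - c| 2 = 1)) +
      (PySem.List.pyRange (i + 1) (PySem.List.len pos) 1).countP (fun j => decide (PySem.Int.mod |PySem.List.pyGetD pos j 0 - c| 2 = 1)) := by
    have hsplit : PySem.List.pyRange 0 (PySem.List.len pos) 1 =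
        PySem.List.pyRange 0 i 1 ++ ([i] ++ PySem.List.pyRange (i + 1) (PySem.List.len pos) 1) := by
      rw [← PySem.List.pyRange_one_singleton i, ← PySem.List.pyRange_one_append i (i+1) _ (by omega) (by simpa using hi.2),
          ← PySem.List.pyRange_one_append 0 i _ hi.1 (by omega)]
    have hmap : pos = (PySem.List.pyRange 0 (PySem.List.len pos) 1).map (fun j => PySem.List.pyGetD pos j 0) :=
      (PySem.List.map_pyGetD_pyRange_zero pos 0).symm
    conv_lhs => rw [hmap]
    rw [List.countP_map, hsplit, List.countP_append, List.countP_append]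
    have : List.countP (fun j => decide (PySem.Int.mod |PySem.List.pyGetD pos j 0 - c| 2 = 1)) [i] = 0 := by
      rw [hc]
      simp [sub_self, PySem.Int.mod, Int.zero_fmod]
    simp only [Function.comp_def]
    omega
  rw [zero_add, ← Nat.cast_add, ← key, pv_count_diff, hg]
  unfold pvF
  split_ifs <;> rfl

theorem pv_counts_len (pos : List Int) : pvEvenC pos + pvOddC pos = pos.length := by
  unfold pvEvenC pvOddC
  rw [List.length_eq_countP_add_countP (fun p : Int => decide (PySem.Int.mod p 2 = 0)) (l := pos)]
  congr 1
  refine List.countP_congr ?_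
  intro q _
  simp

theorem pv_mem_f (pos : List Int) (p : Int) :
    pvF pos p = (pvOddC pos : Int) ∨ pvF pos p = (pvEvenC pos : Int) := by
  unfold pvF; split_ifs <;> simp

-- the minimum A takes over ret equals min(evens, odds)
theorem pv_min_eq (x : Int) (t : List Int) :
    (t.map (pvF (x :: t))).foldl min (pvF (x :: t) x) =
      min (pvEvenC (x :: t) : Int) (pvOddC (x :: t) : Int) := by
  set pos := x :: t with hpos
  set E := pvEvenC pos with hE
  set O := pvOddC pos with hO
  set m := (t.map (pvF pos)).foldl min (pvF pos x) with hm
  have hlen : E + O = pos.length := pv_counts_len pos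
  have hlenpos : 0 < pos.length := by simp [hpos]
  have hub : ∀ p ∈ pos, m ≤ pvF pos p := by
    intro p hp
    rw [hpos] at hp
    rcases List.mem_cons.mp hp with rfl | hp
    · exact (PySem.List.foldl_min_le _ _).1
    · exact (PySem.List.foldl_min_le _ _).2 _ (List.mem_map_of_mem hp)
  have hmem : m = pvF pos x ∨ m ∈ t.map (pvF pos) := PySem.List.foldl_min_mem _ _
  have hmf : ∃ p ∈ pos, m = pvF pos p := by
    rcases hmem with h | h
    · exact ⟨x, by simp [hpos], h⟩
    · obtain ⟨p, hp, hfp⟩ := List.mem_map.mp h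
      exact ⟨p, by simp [hpos, hp], hfp.symm⟩
  have hlow : min (E : Int) (O : Int) ≤ m := by
    obtain ⟨p, _, hmp⟩ := hmf
    rcases pv_mem_f pos p with h | h <;> rw [hmp, h] <;> omega
  have hex : ∃ p ∈ pos, pvF pos p = min (E : Int) (O : Int) := by
    rcases le_total E O with hEO | hEO
    · have hOpos : 0 < O := by omega
      obtain ⟨p, hp, hpodd⟩ := List.countP_pos_iff.mp
        (show 0 < List.countP (fun p => decide (PySem.Int.mod p 2 ≠ 0)) pos from hOpos)
      refine ⟨p, hp, ?_⟩
      unfold pvF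
      simp only [decide_eq_true_eq] at hpodd
      rw [if_neg hpodd]
      omega
    · have hEpos : 0 < E := by omega
      obtain ⟨p, hp, hpeven⟩ := List.countP_pos_iff.mp
        (show 0 < List.countP (fun p => decide (PySem.Int.mod p 2 = 0)) pos from hEpos)
      refine ⟨p, hp, ?_⟩
      unfold pvF
      simp only [decide_eq_true_eq] at hpeven
      rw [if_pos hpeven]
      omega
  obtain ⟨p, hp, hfp⟩ := hex
  have := hub p hp
  omega

theorem pv_movA (pos : List Int) :
    mov_coin pos = (PySem.List.min? (pos.map (pvF pos)) (fun x => x)).getD 0 :=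
  congrArg (fun r => (PySem.List.min? r (fun x => x)).getD 0) (pv_ret_eq pos)

theorem pv_movB (pos : List Int) :
    mov_coin_alt pos =
      if (pvEvenC pos : Int) ≠ 0 ∧ (pvOddC pos : Int) ≠ 0
      then min (pvEvenC pos : Int) (pvOddC pos : Int) else 0 := by
  have h2 : List.foldl (fun acc p => if PySem.Int.mod p 2 ≠ 0 then acc + 1 else acc) (0 : Int) pos = (pvOddC pos : Int) := by
    rw [PySem.List.foldl_ite_add_one, zero_add]
    rfl
  have h1 : mov_coin_alt pos =
      if PySem.List.len pos - List.foldl (fun acc p => if PySem.Int.mod p 2 ≠ 0 then acc + 1 else acc) (0 : Int) pos ≠ 0 ∧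
         List.foldl (fun acc p => if PySem.Int.mod p 2 ≠ 0 then acc + 1 else acc) (0 : Int) pos ≠ 0
      then min (PySem.List.len pos - List.foldl (fun acc p => if PySem.Int.mod p 2 ≠ 0 then acc + 1 else acc) (0 : Int) pos)
               (List.foldl (fun acc p => if PySem.Int.mod p 2 ≠ 0 then acc + 1 else acc) (0 : Int) pos)
      else 0 := rfl
  rw [h1, h2, PySem.List.len_eq]
  have hE : (pos.length : Int) - (pvOddC pos : Int) = (pvEvenC pos : Int) := by
    have := pv_counts_len pos
    omega
  rw [hE]

-- ===== VERDICT (by name: the statement is the Claim_ definition above) =====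
theorem mov_coin_spec : Claim_equal_mov_coin := by
  intro pos hdom hpre
  unfold Spec_mov_coin
  rw [pv_movA, pv_movB]
  obtain ⟨x, t, rfl⟩ := List.exists_cons_of_ne_nil hpre
  rw [List.map_cons, PySem.List.min?_id_cons, Option.getD_some, pv_min_eq]
  have hlen : pvEvenC (x :: t) + pvOddC (x :: t) = (x :: t).length := pv_counts_len (x :: t)
  have hlenpos : 0 < (x :: t).length := by simp
  split_ifs with h
  · rfl
  · rw [Classical.not_and_iff_not_or_not] at h
    omega
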